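-- pv_equiv track=rewrite | github.com/shtouff/aoc2022 | d14/s1/__init__.py | map_as_matrix
-- ===== SOURCE A (Python) =====
-- def map_as_matrix(m: dict):
--     a = []
--     xmax = max([c[0] for c in m.keys()])
--     xmin = min([c[0] for c in m.keys()])
--     ymax = max([c[1] for c in m.keys()])
--
--     for y in range(ymax + 1):
--         a.append([])
--         for x in range(xmin, xmax + 1):
--             if (x, y) in m:
--                 a[y].append(m[(x, y)])
--             else:
--                 a[y].append('.')
--     return a
-- ===== SOURCE B (Python) =====
-- def map_as_matrix(m: dict):
--     keys = list(m.keys())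
--     xmin = min(c[0] for c in keys)
--     xmax = max(c[0] for c in keys)
--     ymax = max(c[1] for c in keys)
--     a = [['.'] * (xmax - xmin + 1) for _ in range(ymax + 1)]
--     for (x, y), v in m.items():
--         if 0 <= y:
--             a[y][x - xmin] = v
--     return a
-- ===== Notes on version B (the rewrite author's own statement) =====
-- stated objective: idiomatic
-- what changed: Replaces the per-cell membership test over the whole grid with a default-filled preallocated grid plus one sparse scatter pass over the dict items (guarded to drop negative-y keys exactly as A's range does).
import Mathlib
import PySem

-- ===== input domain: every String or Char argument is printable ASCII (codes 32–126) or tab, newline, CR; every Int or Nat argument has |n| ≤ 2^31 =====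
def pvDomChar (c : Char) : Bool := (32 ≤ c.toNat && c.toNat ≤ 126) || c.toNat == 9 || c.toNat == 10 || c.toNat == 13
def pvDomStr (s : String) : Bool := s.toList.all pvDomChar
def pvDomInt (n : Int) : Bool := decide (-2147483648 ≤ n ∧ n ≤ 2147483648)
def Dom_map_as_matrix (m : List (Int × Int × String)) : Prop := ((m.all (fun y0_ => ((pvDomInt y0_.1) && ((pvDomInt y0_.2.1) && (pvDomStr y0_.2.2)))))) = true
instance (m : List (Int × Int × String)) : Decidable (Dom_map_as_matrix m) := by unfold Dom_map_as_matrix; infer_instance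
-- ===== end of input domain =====

-- B builds the grid as a default-filled preallocation plus one sparse scatter pass over the
-- dict items, instead of A's per-cell membership test over the whole dense grid (idiomatic).

-- ===== PORT A =====
def map_as_matrix (m : List (Int × Int × String)) : List (List String) :=
  match PySem.List.max? (m.map fun c => c.1) (fun v => v),
        PySem.List.min? (m.map fun c => c.1) (fun v => v),
        PySem.List.max? (m.map fun c => c.2.1) (fun v => v) with
  | some xmax, some xmin, some ymax =>
      (PySem.List.pyRange 0 (ymax + 1) 1).foldl (fun a y =>
        a ++ [(PySem.List.pyRange xmin (xmax + 1) 1).foldl (fun row x =>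
          match m.find? (fun p => p.1 == x && p.2.1 == y) with  -- '(x, y) in m' then 'm[(x, y)]'
          | some p => row ++ [p.2.2]
          | none => row ++ ["."]) []]) []
  | _, _, _ => []   -- max() of an empty dict raises ValueError: excluded by Pre_

-- ===== PORT B =====
def map_as_matrix_alt (m : List (Int × Int × String)) : List (List String) :=
  match PySem.List.min? (m.map fun c => c.1) (fun v => v) with
  | none => []   -- min() of an empty dict raises ValueError: excluded by Pre_
  | some xmin =>
    match PySem.List.max? (m.map fun c => c.1) (fun v => v) with
    | none => []
    | some xmax =>
      match PySem.List.max? (m.map fun c => c.2.1) (fun v => v) with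
      | none => []
      | some ymax =>
        m.foldl (fun a p =>
            if 0 ≤ p.2.1 then
              a.set p.2.1.toNat ((a.getD p.2.1.toNat []).set (p.1 - xmin).toNat p.2.2)
            else a)
          (List.replicate (ymax + 1).toNat (List.replicate (xmax - xmin + 1).toNat "."))

-- ===== PRECONDITION & SPEC =====
-- Pre_ excludes the empty dict (A's max() raises ValueError there, and so does B's min()) and
-- association lists with duplicate (x, y) keys, which cannot arise from a Python dict.
def Pre_map_as_matrix (m : List (Int × Int × String)) : Prop :=
  m ≠ [] ∧ (m.map fun p => (p.1, p.2.1)).Nodup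
instance (m : List (Int × Int × String)) : Decidable (Pre_map_as_matrix m) := by
  unfold Pre_map_as_matrix; infer_instance
def pvWitness_map_as_matrix : (List (Int × Int × String)) := [(0, 0, "o"), (1, 2, "#")]
def Spec_map_as_matrix (m : List (Int × Int × String)) (out : List (List String)) : Prop := out = map_as_matrix_alt m
instance (m : List (Int × Int × String)) (out : List (List String)) : Decidable (Spec_map_as_matrix m out) := by unfold Spec_map_as_matrix; infer_instance

-- ===== CLAIM (what is proved, stated in full; the proofs are below) =====
def Claim_equal_map_as_matrix : Prop := ∀ (m : List (Int × Int × String)), Dom_map_as_matrix m → Pre_map_as_matrix m → Spec_map_as_matrix m (map_as_matrix m)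

-- ===== LEMMAS AND PROOFS =====

-- the key-equality test '(x, y) == key of p'
def pvPred (x y : Int) (p : Int × Int × String) : Bool := p.1 == x && p.2.1 == y

-- B's scatter step
def pvStep (xmin : Int) (a : List (List String)) (p : Int × Int × String) : List (List String) :=
  if 0 ≤ p.2.1 then
    a.set p.2.1.toNat ((a.getD p.2.1.toNat []).set (p.1 - xmin).toNat p.2.2)
  else a

-- A's cell value
def pvCellA (m : List (Int × Int × String)) (y x : Int) : String :=
  match m.find? (pvPred x y) with
  | some p => p.2.2
  | none => "."

lemma scatter_length (xmin : Int) (m : List (Int × Int × String)) (a : List (List String)) :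
    (m.foldl (pvStep xmin) a).length = a.length := by
  induction m generalizing a with
  | nil => rfl
  | cons p t ih =>
      simp only [List.foldl_cons]
      rw [ih]
      unfold pvStep
      split_ifs <;> simp

lemma scatter_rows (xmin : Int) (w : Nat) (m : List (Int × Int × String))
    (a : List (List String)) (h : ∀ row ∈ a, row.length = w) :
    ∀ row ∈ m.foldl (pvStep xmin) a, row.length = w := by
  induction m generalizing a with
  | nil => exact h
  | cons p t ih =>
      simp only [List.foldl_cons]
      refine ih _ ?_
      intro row hrow
      unfold pvStep at hrow
      split_ifs at hrow
      · by_cases hn : p.2.1.toNat < a.length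
        · rcases List.mem_or_eq_of_mem_set hrow with hmem | heq
          · exact h _ hmem
          · subst heq
            rw [List.length_set, List.getD_eq_getElem _ _ hn]
            exact h _ (List.getElem_mem hn)
        · rw [List.set_eq_of_length_le (by omega)] at hrow
          exact h _ hrow
      · exact h _ hrow

lemma find?_reverse_of_nodup_keys (m : List (Int × Int × String))
    (hnd : (m.map fun p => (p.1, p.2.1)).Nodup) (x y : Int) :
    m.reverse.find? (pvPred x y) = m.find? (pvPred x y) := by
  induction m with
  | nil => rfl
  | cons p t ih =>
      simp only [List.map_cons, List.nodup_cons] at hnd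
      obtain ⟨hni, hnd⟩ := hnd
      rw [List.reverse_cons, List.find?_append, ih hnd]
      cases hp : pvPred x y p with
      | true =>
          have hxy : p.1 = x ∧ p.2.1 = y := by
            simpa [pvPred] using hp
          have : t.find? (pvPred x y) = none := by
            rw [List.find?_eq_none]
            intro q hq hqp
            have hq' : q.1 = x ∧ q.2.1 = y := by simpa [pvPred] using hqp
            exact hni (by
              rw [List.mem_map]
              exact ⟨q, hq, by rw [hq'.1, hq'.2, hxy.1, hxy.2]⟩)
          rw [this]
          simp [List.find?, hp]
      | false =>
          simp [List.find?, hp]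

lemma scatter_cell (xmin : Int) (w : Nat) (m : List (Int × Int × String))
    (a : List (List String))
    (hx : ∀ p ∈ m, xmin ≤ p.1 ∧ p.1 - xmin < (w : Int))
    (hrows : ∀ row ∈ a, row.length = w)
    (yi xi : Nat) (hyi : yi < a.length) (hxi : xi < w) :
    ((m.foldl (pvStep xmin) a).getD yi []).getD xi "." =
      match m.reverse.find? (pvPred (xmin + xi) yi) with
      | some p => p.2.2
      | none => ((a.getD yi []).getD xi ".") := by
  induction m generalizing a with
  | nil => rfl
  | cons p t ih =>
      simp only [List.foldl_cons, List.reverse_cons, List.find?_append]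
      have hstep_rows : ∀ row ∈ pvStep xmin a p, row.length = w := by
        intro row hrow
        have := scatter_rows xmin w [p] a hrows row (by simpa using hrow)
        exact this
      have hstep_len : (pvStep xmin a p).length = a.length := by
        have := scatter_length xmin [p] a
        simpa using this
      rw [ih (pvStep xmin a p) (fun q hq => hx q (List.mem_cons_of_mem _ hq)) hstep_rows
        (hstep_len ▸ hyi)]
      cases hf : t.reverse.find? (pvPred (xmin + xi) yi) with
      | some q => simp
      | none =>
          simp only [Option.none_or]
          have hcell : ((pvStep xmin a p).getD yi []).getD xi "." =
              if pvPred (xmin + xi) yi p then p.2.2 else ((a.getD yi []).getD xi ".") := by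
            obtain ⟨hx1, hx2⟩ := hx p (List.mem_cons_self)
            unfold pvStep
            cases hp : pvPred (xmin + xi) yi p with
            | true =>
                have hxy : p.1 = xmin + xi ∧ p.2.1 = (yi : Int) := by
                  simpa [pvPred] using hp
                have hy0 : (0:Int) ≤ p.2.1 := by rw [hxy.2]; exact_mod_cast Nat.zero_le yi
                have hyn : p.2.1.toNat = yi := by omega
                have hxn : (p.1 - xmin).toNat = xi := by omega
                have hrowlen : (a.getD yi []).length = w :=
                  hrows _ (by rw [List.getD_eq_getElem _ _ hyi]; exact List.getElem_mem hyi)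
                rw [if_pos hy0, hyn, hxn]
                have houter : (a.set yi ((a.getD yi []).set xi p.2.2)).getD yi [] =
                    (a.getD yi []).set xi p.2.2 := by
                  rw [List.getD_eq_getElem?_getD, List.getElem?_set_self hyi]; rfl
                rw [houter, List.getD_eq_getElem?_getD,
                    List.getElem?_set_self (by rw [hrowlen]; exact hxi)]
                simp
            | false =>
                simp only [Bool.false_eq_true, if_false]
                split_ifs with hy0
                · by_cases hyn : p.2.1.toNat = yi
                  · have hyeq : p.2.1 = (yi : Int) := by omega
                    have hxne : p.1 ≠ xmin + xi := by
                      intro hxe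
                      simp [pvPred, hxe, hyeq] at hp
                    have hxn : (p.1 - xmin).toNat ≠ xi := by omega
                    have houter : (a.set p.2.1.toNat ((a.getD p.2.1.toNat []).set (p.1 - xmin).toNat p.2.2)).getD yi [] =
                        (a.getD yi []).set (p.1 - xmin).toNat p.2.2 := by
                      rw [hyn, List.getD_eq_getElem?_getD, List.getElem?_set_self hyi]; rfl
                    rw [houter, List.getD_eq_getElem?_getD, List.getElem?_set_ne hxn,
                        ← List.getD_eq_getElem?_getD]
                  · have houter : (a.set p.2.1.toNat ((a.getD p.2.1.toNat []).set (p.1 - xmin).toNat p.2.2)).getD yi [] =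
                        a.getD yi [] := by
                      rw [List.getD_eq_getElem?_getD, List.getElem?_set_ne hyn,
                          ← List.getD_eq_getElem?_getD]
                    rw [houter]
                · rfl
          rw [hcell]
          cases hp : pvPred (xmin + xi) yi p <;> simp [List.find?, hp]

lemma foldl_cellA (m : List (Int × Int × String)) (y : Int) (xmin xmax : Int) :
    (PySem.List.pyRange xmin (xmax + 1) 1).foldl (fun row x =>
        match m.find? (fun p => p.1 == x && p.2.1 == y) with
        | some p => row ++ [p.2.2]
        | none => row ++ ["."]) [] =
      (PySem.List.pyRange xmin (xmax + 1) 1).map (fun x => pvCellA m y x) := by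
  have hfe : (fun (row : List String) x =>
      match m.find? (fun p => p.1 == x && p.2.1 == y) with
      | some p => row ++ [p.2.2]
      | none => row ++ ["."]) = fun row x => row ++ [pvCellA m y x] := by
    funext row x
    unfold pvCellA pvPred
    cases m.find? (fun p => p.1 == x && p.2.1 == y) <;> rfl
  rw [hfe, PySem.List.foldl_append_singleton_eq_map]
  rfl

-- ===== VERDICT (by name: the statement is the Claim_ definition above) =====
theorem map_as_matrix_spec : Claim_equal_map_as_matrix := by
  intro m _ hpre
  obtain ⟨hne, hnd⟩ := hpre
  unfold Spec_map_as_matrix map_as_matrix map_as_matrix_alt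
  cases hxmax : PySem.List.max? (m.map fun c => c.1) (fun v => v) with
  | none => exact absurd (by simpa using (PySem.List.max?_eq_none_iff _ _).mp hxmax) hne
  | some xmax =>
  cases hxmin : PySem.List.min? (m.map fun c => c.1) (fun v => v) with
  | none => exact absurd (by simpa using (PySem.List.min?_eq_none_iff _ _).mp hxmin) hne
  | some xmin =>
  cases hymax : PySem.List.max? (m.map fun c => c.2.1) (fun v => v) with
  | none => exact absurd (by simpa using (PySem.List.max?_eq_none_iff _ _).mp hymax) hne
  | some ymax =>
  simp only
  rw [PySem.List.foldl_append_singleton_eq_map]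
  simp only [List.nil_append, foldl_cellA]
  have hstep : (fun (a : List (List String)) (p : Int × Int × String) =>
      if 0 ≤ p.2.1 then
        a.set p.2.1.toNat ((a.getD p.2.1.toNat []).set (p.1 - xmin).toNat p.2.2)
      else a) = pvStep xmin := rfl
  rw [hstep]
  set w : Nat := (xmax - xmin + 1).toNat with hw
  set a0 : List (List String) := List.replicate (ymax + 1).toNat (List.replicate w ".") with ha0
  have hxmax' : ∀ p ∈ m, p.1 ≤ xmax := fun p hp =>
    PySem.List.max?_isMax hxmax p.1 (List.mem_map_of_mem hp)
  have hxmin' : ∀ p ∈ m, xmin ≤ p.1 := fun p hp =>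
    PySem.List.min?_isMin hxmin p.1 (List.mem_map_of_mem hp)
  have hxx : xmin ≤ xmax := by
    obtain ⟨p0, hp0⟩ := List.exists_mem_of_ne_nil m hne
    exact le_trans (hxmin' p0 hp0) (hxmax' p0 hp0)
  have hwi : (w : Int) = xmax - xmin + 1 := by
    rw [hw]; exact Int.toNat_of_nonneg (by omega)
  have hx : ∀ p ∈ m, xmin ≤ p.1 ∧ p.1 - xmin < (w : Int) := by
    intro p hp
    have := hxmax' p hp
    have := hxmin' p hp
    omega
  have hrows0 : ∀ row ∈ a0, row.length = w := by
    intro row hrow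
    rw [List.eq_of_mem_replicate hrow, List.length_replicate]
  have hlen0 : a0.length = (ymax + 1).toNat := List.length_replicate
  apply List.ext_getElem
  · rw [List.length_map, PySem.List.length_pyRange_one, scatter_length, hlen0]
    omega
  · intro yi h1 h2
    have hyi0 : yi < a0.length := by rwa [scatter_length] at h2
    rw [List.getElem_map, PySem.List.getElem_pyRange_one]
    have hrowlen : (List.foldl (pvStep xmin) a0 m)[yi].length = w :=
      scatter_rows xmin w m a0 hrows0 _ (List.getElem_mem h2)
    apply List.ext_getElem
    · rw [List.length_map, PySem.List.length_pyRange_one, hrowlen]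
      omega
    · intro xi h3 h4
      have hxi : xi < w := by rwa [hrowlen] at h4
      rw [List.getElem_map, PySem.List.getElem_pyRange_one]
      have hcell := scatter_cell xmin w m a0 hx hrows0 yi xi hyi0 hxi
      rw [find?_reverse_of_nodup_keys m hnd] at hcell
      have hL : ((List.foldl (pvStep xmin) a0 m).getD yi []).getD xi "." =
          (List.foldl (pvStep xmin) a0 m)[yi][xi] := by
        rw [List.getD_eq_getElem _ _ h2, List.getD_eq_getElem _ _ h4]
      have ha0cell : (a0.getD yi []).getD xi "." = "." := by
        have hrow0 : a0.getD yi [] = List.replicate w "." := by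
          rw [ha0, List.getD_eq_getElem _ _ (by have := hyi0; rw [hlen0] at this; simpa using this), List.getElem_replicate]
        rw [hrow0, List.getD_eq_getElem _ _ (by simpa using hxi), List.getElem_replicate]
      rw [hL, ha0cell] at hcell
      simp only [zero_add]
      rw [hcell]
      rfl
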